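-- pv_equiv track=rewrite | github.com/ShubhamDalvi1911/LeetCode | StringProblems/longest_substring.py | longestsubstrings
-- ===== SOURCE A (Python) =====
-- def longestsubstrings(s: str) -> list:
--     """
--     Partition string into substrings with unique characters using a sliding window.
--     When a duplicate is found, append current substring and remove up to (and including)
--     the first occurrence of the duplicate.
--     Example: "dvdf" -> ["dv", "vdf"]
--     """
--     parts = []
--     current = ""
--     for ch in s:
--         if ch not in current:
--             current += ch
--         else:
--             # Found duplicate - append current and slide the window
--             parts.append(current)
--             idx = current.index(ch)
--             current = current[idx + 1:] + ch
--     if current: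
--         parts.append(current)
--     return parts
-- ===== SOURCE B (Python) =====
-- def longestsubstrings(s: str) -> list:
--     """Peel parts off s one at a time: for each part, scan forward from its start,
--     recording each character's position in a fresh per-part map, until a character
--     repeats; emit the slice and restart just past the first occurrence.
--     No window string is ever built or maintained."""
--     parts = []
--     n = len(s)
--     i = 0
--     while i < n:
--         pos = {}
--         j = i
--         while j < n:
--             ch = s[j]
--             if ch in pos:
--                 break
--             pos[ch] = j
--             j += 1
--         if j == n:
--             parts.append(s[i:])
--             break
--         parts.append(s[i:j])
--         i = pos[s[j]] + 1
--     return parts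
-- ===== Notes on version B (the rewrite author's own statement) =====
-- stated objective: alternative
-- what changed: Replaces A's single pass that carries a growing window string across parts (membership test and .index on it per character) by a peel loop: one outer iteration per emitted part whose inner scan restarts at the part's start with a fresh per-part position map and slices the part directly out of s, re-scanning the overlap between consecutive parts.
import Mathlib
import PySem

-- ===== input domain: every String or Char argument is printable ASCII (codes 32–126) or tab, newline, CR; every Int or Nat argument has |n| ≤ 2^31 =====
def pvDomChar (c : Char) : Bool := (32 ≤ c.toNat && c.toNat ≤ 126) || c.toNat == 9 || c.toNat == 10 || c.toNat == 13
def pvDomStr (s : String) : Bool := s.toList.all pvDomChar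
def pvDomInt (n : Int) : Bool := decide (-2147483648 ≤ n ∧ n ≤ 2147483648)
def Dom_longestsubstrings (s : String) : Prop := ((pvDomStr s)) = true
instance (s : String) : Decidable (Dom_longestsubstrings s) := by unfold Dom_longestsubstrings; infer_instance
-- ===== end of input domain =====

-- B (alternative): instead of A's single pass that carries a window string across parts,
-- B peels one part at a time — an outer loop per part whose inner scan restarts from the
-- part's start with a fresh per-part position map, slicing each part out of s.

-- ===== PORT A =====
-- one iteration of A's for-loop; state = (parts, current); strings handled on the char-list side (PySem.Chars)
def pvAStep (st : List String × List Char) (ch : Char) : List String × List Char :=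
  if ch ∈ st.2 then
    -- current.index(ch): ch ∈ current holds under this branch, so index? is some (Python would raise otherwise)
    let idx := (PySem.List.index? st.2 ch).getD 0
    (st.1 ++ [String.ofList st.2], PySem.List.slice st.2 (some ((idx : Int) + 1)) none ++ [ch])
  else
    (st.1, st.2 ++ [ch])

-- the trailing 'if current: parts.append(current)'
def pvAFinish (r : List String × List Char) : List String :=
  if r.2 ≠ [] then r.1 ++ [String.ofList r.2] else r.1

def longestsubstrings (s : String) : List String :=
  pvAFinish (s.toList.foldl pvAStep ([], []))

-- ===== PORT B =====
-- inner while loop: scan forward from j recording each char's index until a repeat; indices are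
-- nonnegative throughout, kept as Nat (the same values Python stores)
def pvScanB (cs : List Char) (pos : PySem.Dict Char Nat) (j : Nat) : PySem.Dict Char Nat × Nat :=
  if h : j < cs.length then
    if pos.contains cs[j] then (pos, j)
    else pvScanB cs (pos.insert cs[j] j) (j + 1)
  else (pos, j)
termination_by cs.length - j

-- outer while loop; fuel only makes the recursion total: i strictly increases every
-- iteration (the stored index is ≥ i), so fuel = len + 1 is never exhausted
def pvPeelB (cs : List Char) : Nat → List String → Nat → List String
  | 0, parts, _ => parts
  | fuel + 1, parts, i =>
    if i < cs.length then
      let pj := pvScanB cs PySem.Dict.empty i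
      if pj.2 = cs.length then
        parts ++ [String.ofList (PySem.List.slice cs (some (i : Int)) none)]
      else
        pvPeelB cs fuel
          (parts ++ [String.ofList (PySem.List.slice cs (some (i : Int)) (some (pj.2 : Int)))])
          (pj.1.getD (cs.getD pj.2 default) 0 + 1)
    else parts

def longestsubstrings_alt (s : String) : List String :=
  pvPeelB s.toList (s.toList.length + 1) [] 0

-- ===== PRECONDITION & SPEC =====
def Spec_longestsubstrings (s : String) (out : List String) : Prop := out = longestsubstrings_alt s
instance (s : String) (out : List String) : Decidable (Spec_longestsubstrings s out) := by unfold Spec_longestsubstrings; infer_instance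

-- ===== CLAIM (what is proved, stated in full; the proofs are below) =====
def Claim_equal_longestsubstrings : Prop := ∀ (s : String), Dom_longestsubstrings s → Spec_longestsubstrings s (longestsubstrings s)

-- ===== LEMMAS AND PROOFS =====

-- A's loop over a duplicate-free block only grows the window
lemma pvNodupRun (u : List Char) : ∀ (parts : List String) (cur : List Char),
    (cur ++ u).Nodup → u.foldl pvAStep (parts, cur) = (parts, cur ++ u) := by
  induction u with
  | nil => intro parts cur _; simp
  | cons ch u' ih =>
    intro parts cur hnd
    have hch : ch ∉ cur := by
      intro hm
      rcases List.nodup_append.mp hnd with ⟨_, _, hdisj⟩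
      exact hdisj ch hm ch (by simp) rfl
    have hstep : pvAStep (parts, cur) ch = (parts, cur ++ [ch]) := by
      unfold pvAStep; rw [if_neg hch]
    rw [List.foldl_cons, hstep, ih parts (cur ++ [ch]) (by simpa using hnd)]
    simp

-- invariant of the inner scan's position map
def pvPosInv (cs : List Char) (i m : Nat) (pos : PySem.Dict Char Nat) : Prop :=
  ∀ c, pos.get? c = (PySem.List.index? ((cs.drop i).take m) c).map (fun r => i + r)

lemma pvScanB_spec (cs : List Char) (i : Nat) : ∀ (m : Nat) (pos : PySem.Dict Char Nat),
    i + m ≤ cs.length → ((cs.drop i).take m).Nodup → pvPosInv cs i m pos →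
    ∃ (m' : Nat) (pos' : PySem.Dict Char Nat),
      pvScanB cs pos (i + m) = (pos', i + m') ∧ m ≤ m' ∧ i + m' ≤ cs.length ∧
      ((cs.drop i).take m').Nodup ∧ pvPosInv cs i m' pos' ∧
      (i + m' = cs.length ∨ ∃ h : i + m' < cs.length, cs[i + m'] ∈ (cs.drop i).take m') := by
  suffices H : ∀ (d m : Nat) (pos : PySem.Dict Char Nat), cs.length - (i + m) = d →
      i + m ≤ cs.length → ((cs.drop i).take m).Nodup → pvPosInv cs i m pos →
      ∃ (m' : Nat) (pos' : PySem.Dict Char Nat),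
        pvScanB cs pos (i + m) = (pos', i + m') ∧ m ≤ m' ∧ i + m' ≤ cs.length ∧
        ((cs.drop i).take m').Nodup ∧ pvPosInv cs i m' pos' ∧
        (i + m' = cs.length ∨ ∃ h : i + m' < cs.length, cs[i + m'] ∈ (cs.drop i).take m') by
    intro m pos hle hnd hinv
    exact H (cs.length - (i + m)) m pos rfl hle hnd hinv
  intro d
  induction d with
  | zero =>
    intro m pos hd hle hnd hinv
    have heq : i + m = cs.length := by omega
    refine ⟨m, pos, ?_, le_refl m, hle, hnd, hinv, Or.inl heq⟩
    unfold pvScanB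
    rw [dif_neg (by omega)]
  | succ d ih =>
    intro m pos hd hle hnd hinv
    have hlt : i + m < cs.length := by omega
    have hm_t : m < (cs.drop i).length := by simp [List.length_drop]; omega
    have hw : (cs.drop i)[m] = cs[i + m] := by
      rw [List.getElem_drop]
    by_cases hmem : cs[i + m] ∈ (cs.drop i).take m
    · -- repeat found: the scan stops here
      refine ⟨m, pos, ?_, le_refl m, hle, hnd, hinv, Or.inr ⟨hlt, hmem⟩⟩
      unfold pvScanB
      rw [dif_pos hlt, if_pos ?_]
      have := hinv cs[i + m]
      have hsome : (PySem.List.index? ((cs.drop i).take m) cs[i + m]).isSome :=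
        (PySem.List.index?_isSome_iff _ _).mpr hmem
      rw [PySem.Dict.contains_eq_isSome_get?, this]
      cases hidx : PySem.List.index? ((cs.drop i).take m) cs[i + m] with
      | none => rw [hidx] at hsome; simp at hsome
      | some r => simp
    · -- fresh char: record it and continue
      have hsplit : (cs.drop i).take (m + 1) = (cs.drop i).take m ++ [cs[i + m]] := by
        rw [List.take_add_one, List.getElem?_drop, List.getElem?_eq_getElem hlt]
        rfl
      have hlen : ((cs.drop i).take m).length = m := by
        simp [List.length_take]; omega
      have hnd' : ((cs.drop i).take (m + 1)).Nodup := by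
        rw [hsplit, List.nodup_append]
        refine ⟨hnd, List.nodup_singleton _, ?_⟩
        intro a ha b hb hab
        rw [List.mem_singleton] at hb
        subst hb; subst hab
        exact hmem ha
      have hinv' : pvPosInv cs i (m + 1) (pos.insert cs[i + m] (i + m)) := by
        intro c
        rw [hsplit]
        by_cases hc : c = cs[i + m]
        · subst hc
          rw [PySem.Dict.get?_insert_self,
              PySem.List.index?_append_singleton_self _ _ hmem, hlen]
          simp
        · rw [PySem.Dict.get?_insert_of_ne _ _ hc, hinv c]
          by_cases hcm : c ∈ (cs.drop i).take m
          · rw [PySem.List.index?_append_of_mem _ hcm]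
          · rw [(PySem.List.index?_eq_none_iff _ _).mpr hcm,
                (PySem.List.index?_eq_none_iff _ _).mpr (by
                  simp only [List.mem_append, List.mem_singleton]
                  rintro (h1 | h2)
                  · exact hcm h1
                  · exact hc h2)]
      have hstep : pvScanB cs pos (i + m) = pvScanB cs (pos.insert cs[i + m] (i + m)) (i + m + 1) := by
        conv_lhs => unfold pvScanB
        rw [dif_pos hlt, if_neg ?_]
        rw [PySem.Dict.contains_eq_isSome_get?, hinv cs[i + m],
            (PySem.List.index?_eq_none_iff _ _).mpr hmem]
        simp
      obtain ⟨m', pos', heq, hge, hle', hnd'', hinv'', hend⟩ :=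
        ih (m + 1) (pos.insert cs[i + m] (i + m)) (by omega) (by omega) hnd' hinv'
      refine ⟨m', pos', ?_, by omega, hle', hnd'', hinv'', hend⟩
      rw [hstep]
      have : i + m + 1 = i + (m + 1) := by omega
      rw [this, heq]

-- main correspondence: A's run over the suffix cs.drop i equals B's peel loop from i
lemma pvMain (cs : List Char) : ∀ (fuel i : Nat) (parts : List String),
    i ≤ cs.length → cs.length - i < fuel →
    pvAFinish ((cs.drop i).foldl pvAStep (parts, [])) = pvPeelB cs fuel parts i := by
  intro fuel
  induction fuel with
  | zero => intro i parts h1 h2; omega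
  | succ fuel ih =>
    intro i parts hile hfuel
    by_cases hin : i < cs.length
    · obtain ⟨m', pos', hscan, _, hle', hnd', hinv', hend⟩ :=
        pvScanB_spec cs i 0 PySem.Dict.empty (by omega) (by simp)
          (fun c => by simp [PySem.Dict.get?_empty, PySem.List.index?])
      rw [Nat.add_zero] at hscan
      have hlenw : ((cs.drop i).take m').length = m' := by
        simp [List.length_take, List.length_drop]; omega
      rcases hend with hEnd | ⟨hlt2, hmem⟩
      · -- the scan reached the end of s: the whole suffix is duplicate-free
        have hall : (cs.drop i).take m' = cs.drop i := by
          apply List.take_of_length_le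
          simp [List.length_drop]; omega
        rw [hall] at hnd'
        rw [pvNodupRun (cs.drop i) parts [] (by simpa using hnd')]
        unfold pvPeelB pvAFinish
        rw [if_pos hin, hscan]
        simp only [hEnd]
        rw [PySem.List.slice_from_natCast]
        rw [if_pos (by simp [List.drop_eq_nil_iff]; omega)]
        simp
      · -- the scan broke on a duplicate character cs[i + m']
        have hmemw : cs[i + m'] ∈ (cs.drop i).take m' := hmem
        obtain ⟨r, hr⟩ := Option.isSome_iff_exists.mp ((PySem.List.index?_isSome_iff _ _).mpr hmemw)
        obtain ⟨pre, suf, hweq, hprelen, hchpre⟩ := (PySem.List.index?_eq_some_iff _ _ _).mp hr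
        have hrm : r < m' := by
          have := congrArg List.length hweq
          simp [hlenw] at this
          omega
        have hsuflen : suf.length = m' - r - 1 := by
          have := congrArg List.length hweq
          simp [hlenw] at this
          omega
        have hchsuf : cs[i + m'] ∉ suf := by
          have := hweq ▸ hnd'
          rcases List.nodup_append.mp (by simpa using this) with ⟨_, hcs, _⟩
          exact (List.nodup_cons.mp hcs).1
        have hsufnd : suf.Nodup := by
          have := hweq ▸ hnd'
          rcases List.nodup_append.mp (by simpa using this) with ⟨_, hcs, _⟩
          exact (List.nodup_cons.mp hcs).2
        -- decompose the suffix: t = w ++ cs[i+m'] :: t.drop (m'+1)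
        have hmlt : m' < (cs.drop i).length := by simp [List.length_drop]; omega
        have htdec : cs.drop i = (cs.drop i).take m' ++ cs[i + m'] :: (cs.drop i).drop (m' + 1) := by
          conv_lhs => rw [← List.take_append_drop m' (cs.drop i)]
          congr 1
          rw [List.drop_eq_getElem_cons hmlt]
          congr 1
          rw [List.getElem_drop]
        -- run A over the duplicate-free block, then one duplicate step
        have hfold1 : (cs.drop i).foldl pvAStep (parts, []) =
            ((cs.drop i).drop (m' + 1)).foldl pvAStep
              (pvAStep (parts, (cs.drop i).take m') cs[i + m']) := by
          conv_lhs => rw [htdec]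
          rw [List.foldl_append]
          rw [pvNodupRun _ parts [] (by simpa using hnd')]
          rw [List.foldl_cons]
          simp
        have hstep : pvAStep (parts, (cs.drop i).take m') cs[i + m'] =
            (parts ++ [String.ofList ((cs.drop i).take m')], suf ++ [cs[i + m']]) := by
          unfold pvAStep
          rw [if_pos hmemw]
          simp only [hr, Option.getD_some]
          congr 1
          have hcast : ((r : Int) + 1) = ((r + 1 : Nat) : Int) := by push_cast; ring
          rw [hcast, PySem.List.slice_from_natCast]
          congr 1
          rw [hweq]
          have : pre ++ cs[i + m'] :: suf = (pre ++ [cs[i + m']]) ++ suf := by simp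
          rw [this, List.drop_append_of_le_length (by simp [hprelen])]
          rw [List.drop_eq_nil_of_le (by simp [hprelen])]
          simp
        -- the new window and remainder are a take/drop split of cs.drop (i + r + 1)
        have ht2 : (cs.drop i).drop (r + 1) = suf ++ cs[i + m'] :: (cs.drop i).drop (m' + 1) := by
          conv_lhs => rw [htdec, hweq]
          have : (pre ++ cs[i + m'] :: suf) ++ cs[i + m'] :: (cs.drop i).drop (m' + 1)
              = (pre ++ [cs[i + m']]) ++ (suf ++ cs[i + m'] :: (cs.drop i).drop (m' + 1)) := by simp
          rw [this, List.drop_append_of_le_length (by simp [hprelen])]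
          rw [List.drop_eq_nil_of_le (by simp [hprelen])]
          simp
        have htake2 : (cs.drop (i + r + 1)).take (m' - r) = suf ++ [cs[i + m']] := by
          rw [show i + r + 1 = i + (r + 1) by omega, ← List.drop_drop, ht2]
          rw [show m' - r = suf.length + 1 by omega]
          rw [show suf ++ cs[i + m'] :: List.drop (m' + 1) (List.drop i cs)
              = suf ++ (cs[i + m'] :: List.drop (m' + 1) (List.drop i cs)) by simp]
          rw [List.take_append]
          simp
        have hdrop2 : (cs.drop (i + r + 1)).drop (m' - r) = (cs.drop i).drop (m' + 1) := by
          rw [show i + r + 1 = i + (r + 1) by omega, ← List.drop_drop, ht2]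
          rw [show suf ++ cs[i + m'] :: (cs.drop i).drop (m' + 1)
              = (suf ++ [cs[i + m']]) ++ (cs.drop i).drop (m' + 1) by simp]
          rw [show m' - r = (suf ++ [cs[i + m']]).length by simp [hsuflen]; omega]
          exact List.drop_left
        have hndw2 : ((cs.drop (i + r + 1)).take (m' - r)).Nodup := by
          rw [htake2, List.nodup_append]
          refine ⟨hsufnd, List.nodup_singleton _, ?_⟩
          intro a ha b hb hab
          rw [List.mem_singleton] at hb
          subst hb; subst hab
          exact hchsuf ha
        have hfold2 : ((cs.drop i).drop (m' + 1)).foldl pvAStep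
              (parts ++ [String.ofList ((cs.drop i).take m')], suf ++ [cs[i + m']])
            = (cs.drop (i + r + 1)).foldl pvAStep
              (parts ++ [String.ofList ((cs.drop i).take m')], []) := by
          conv_rhs => rw [← List.take_append_drop (m' - r) (cs.drop (i + r + 1))]
          rw [List.foldl_append, pvNodupRun _ _ [] (by simpa using hndw2), htake2, hdrop2]
          simp
        rw [hfold1, hstep, hfold2]
        rw [ih (i + r + 1) (parts ++ [String.ofList ((cs.drop i).take m')]) (by omega) (by omega)]
        -- B's side takes the same step
        conv_rhs => unfold pvPeelB
        rw [if_pos hin, hscan]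
        simp only
        rw [if_neg (by omega)]
        have hslice : PySem.List.slice cs (some (i : Int)) (some ((i + m' : Nat) : Int))
            = (cs.drop i).take m' := by
          rw [PySem.List.slice_natCast]
          congr 1
          omega
        have hgetc : cs.getD (i + m') default = cs[i + m'] := by
          rw [List.getD_eq_getElem?_getD, List.getElem?_eq_getElem hlt2]
          rfl
        have hpos : pos'.getD cs[i + m'] 0 = i + r := by
          apply PySem.Dict.getD_of_get?_eq_some
          rw [hinv' cs[i + m'], hr]
          rfl
        rw [hslice, hgetc, hpos]
    · rw [List.drop_eq_nil_of_le (by omega)]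
      unfold pvPeelB pvAFinish
      rw [if_neg hin]
      simp

-- ===== VERDICT (by name: the statement is the Claim_ definition above) =====
theorem longestsubstrings_spec : Claim_equal_longestsubstrings := by
  intro s _
  unfold Spec_longestsubstrings longestsubstrings longestsubstrings_alt
  have := pvMain s.toList (s.toList.length + 1) 0 [] (by omega) (by omega)
  simpa using this
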